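-- pv_equiv track=rewrite | github.com/jean0206/alpha-beta-exercise | alphaybetha.py | get_even_row
-- ===== SOURCE A (Python) =====
-- DOT = 'O'
--
-- LINE_SIZE = 3
--
-- def get_even_row(node, row, cols):
--     [start, end] = [
--         int((row/2) * (2 * cols - 1)),
--         int((row/2) * (2 * cols - 1) + cols - 1)
--     ]
--     row_nodes = node[start:end]
--
--     row = ""
--
--     for col in range(2 * cols - 1):
--         if col % 2 == 0:
--             row = row + DOT
--         else:
--             head_symbol = row_nodes.pop(0)
--             symbol = " " if head_symbol is None else head_symbol
--
--             row = row + symbol * LINE_SIZE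
--
--     return row
-- ===== SOURCE B (Python) =====
-- DOT = 'O'
--
-- LINE_SIZE = 3
--
-- def get_even_row(node, row, cols):
--     start = int((row / 2) * (2 * cols - 1))
--     end = int((row / 2) * (2 * cols - 1) + cols - 1)
--     row_nodes = node[start:end]
--
--     pieces = [DOT] * (2 * cols - 1)
--     for i in range(1, len(pieces), 2):
--         value = row_nodes[i // 2]
--         pieces[i] = (" " if value is None else value) * LINE_SIZE
--     return "".join(pieces)
-- ===== Notes on version B (the rewrite author's own statement) =====
-- stated objective: alternative
-- what changed: B drops A's even/odd parity branch and mutating pop(0): it pre-fills a list of 2*cols-1 dot pieces, overwrites each odd slot with the cell string taken by direct indexing into the slice, and joins the pieces; Pre_ excludes only the inputs where A raises IndexError (the slice holds fewer than cols-1 nodes).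
import Mathlib
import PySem

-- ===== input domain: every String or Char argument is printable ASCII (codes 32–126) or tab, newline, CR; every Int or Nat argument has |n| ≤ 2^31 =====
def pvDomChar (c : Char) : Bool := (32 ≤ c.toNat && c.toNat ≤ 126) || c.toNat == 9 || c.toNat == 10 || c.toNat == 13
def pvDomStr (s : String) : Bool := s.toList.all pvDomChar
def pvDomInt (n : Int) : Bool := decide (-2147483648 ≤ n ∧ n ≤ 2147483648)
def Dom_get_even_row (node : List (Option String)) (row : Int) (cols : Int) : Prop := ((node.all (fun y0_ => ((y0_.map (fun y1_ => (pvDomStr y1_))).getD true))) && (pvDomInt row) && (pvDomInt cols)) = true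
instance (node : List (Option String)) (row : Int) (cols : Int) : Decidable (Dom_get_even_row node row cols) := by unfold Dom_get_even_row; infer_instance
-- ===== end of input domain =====

-- B replaces A's even/odd parity loop (which mutates row_nodes with pop(0)) by a pre-filled list of
-- 2*cols-1 dot pieces whose odd slots are overwritten with the cell strings, then joined; equivalent
-- wherever A returns (Pre_ excludes only A's IndexError inputs).
-- Python's int((row/2)*(2*cols-1)) is float arithmetic; it equals integer truncation (PySem.Int.truncdiv)
-- whenever the slice window touches the list (which Pre_ forces for cols ≥ 2; for cols ≤ 1 the result
-- does not depend on the slice).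

-- ===== PORT A =====
-- one step of A's for-loop: state = (accumulated row chars, remaining row_nodes); none = pop(0) raised IndexError
def pvStepA (acc : Option (List Char × List (Option String))) (col : Int) :
    Option (List Char × List (Option String)) :=
  match acc with
  | none => none
  | some (r, rn) =>
    if PySem.Int.mod col 2 = 0 then
      some (r ++ ['O'], rn)                           -- row = row + DOT
    else
      match rn with
      | [] => none                                    -- row_nodes.pop(0) raises IndexError
      | h :: t =>
        match h with                                  -- symbol = " " if head_symbol is None else head_symbol
        | none => some (r ++ ([' '] ++ [' '] ++ [' ']), t)              -- row = row + symbol * LINE_SIZE (3)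
        | some s => some (r ++ (s.toList ++ s.toList ++ s.toList), t)

def get_even_row (node : List (Option String)) (row : Int) (cols : Int) : String :=
  -- start/stop: int((row/2)*(2*cols-1)) and int((row/2)*(2*cols-1)+cols-1), as exact integer truncation (header note)
  match (PySem.List.pyRange 0 (2 * cols - 1) 1).foldl pvStepA
      (some (([] : List Char),
        PySem.List.slice node
          (some (PySem.Int.truncdiv (row * (2 * cols - 1)) 2))
          (some (PySem.Int.truncdiv (row * (2 * cols - 1) + 2 * (cols - 1)) 2)))) with
  | some (r, _) => String.ofList r
  | none => ""                                        -- unreachable under Pre_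

-- ===== PORT B =====
-- (" " if value is None else value) * LINE_SIZE
def pvCellB (v : Option String) : List Char :=
  match v with
  | none => [' '] ++ [' '] ++ [' ']
  | some s => s.toList ++ s.toList ++ s.toList

-- one step of B's for-loop: pieces[i] = cell string; none = row_nodes[i // 2] raised IndexError
def pvStepB (rn : List (Option String)) (acc : Option (List (List Char))) (i : Int) :
    Option (List (List Char)) :=
  match acc with
  | none => none
  | some pieces =>
    match PySem.List.pyGet? rn (PySem.Int.floordiv i 2) with
    | none => none                                    -- row_nodes[i // 2] raises IndexError
    | some v => some (PySem.List.pySetD pieces i (pvCellB v))   -- pieces[i] = …; i ≥ 1 < len, always in range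

def get_even_row_alt (node : List (Option String)) (row : Int) (cols : Int) : String :=
  -- pieces = [DOT] * (2 * cols - 1)  (Python list-mult clamps a negative count to the empty list, as .toNat does)
  match (PySem.List.pyRange 1 ((List.replicate (2 * cols - 1).toNat (['O'] : List Char)).length : Int) 2).foldl
      (pvStepB (PySem.List.slice node
        (some (PySem.Int.truncdiv (row * (2 * cols - 1)) 2))
        (some (PySem.Int.truncdiv (row * (2 * cols - 1) + 2 * (cols - 1)) 2))))
      (some (List.replicate (2 * cols - 1).toNat ['O'])) with
  | some pieces => String.ofList (PySem.Chars.join [] pieces)   -- "".join(pieces)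
  | none => ""                                        -- unreachable under Pre_

-- ===== PRECONDITION & SPEC =====
-- Pre_ excludes exactly the inputs where A raises IndexError: cols ≥ 2 but the slice holds fewer than cols-1 nodes.
def Pre_get_even_row (node : List (Option String)) (row : Int) (cols : Int) : Prop :=
  1 < cols →
    cols - 1 ≤ ((PySem.List.slice node
      (some (PySem.Int.truncdiv (row * (2 * cols - 1)) 2))
      (some (PySem.Int.truncdiv (row * (2 * cols - 1) + 2 * (cols - 1)) 2))).length : Int)
instance (node : List (Option String)) (row : Int) (cols : Int) : Decidable (Pre_get_even_row node row cols) := by unfold Pre_get_even_row; infer_instance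

def pvWitness_get_even_row : List (Option String) × Int × Int := ([some "X", none], 0, 3)

def Spec_get_even_row (node : List (Option String)) (row : Int) (cols : Int) (out : String) : Prop := out = get_even_row_alt node row cols
instance (node : List (Option String)) (row : Int) (cols : Int) (out : String) : Decidable (Spec_get_even_row node row cols out) := by unfold Spec_get_even_row; infer_instance

-- ===== CLAIM (what is proved, stated in full; the proofs are below) =====
def Claim_equal_get_even_row : Prop := ∀ (node : List (Option String)) (row : Int) (cols : Int), Dom_get_even_row node row cols → Pre_get_even_row node row cols → Spec_get_even_row node row cols (get_even_row node row cols)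

-- ===== LEMMAS AND PROOFS =====

lemma pvInterNil (l : List (List Char)) : List.intercalate [] l = l.flatten := by
  induction l with
  | nil => simp [List.intercalate]
  | cons x xs ih =>
    cases xs with
    | nil => simp [List.intercalate]
    | cons y ys =>
      simp [List.intercalate, List.intersperse] at *
      simpa [List.intercalate, List.intersperse] using ih

lemma pvJoinNil (l : List (List Char)) : PySem.Chars.join [] l = l.flatten := by
  simp [PySem.Chars.join, pvInterNil]

-- A's loop over range(2k+1), started with at least k nodes in stock, emits 'O' cell₀ 'O' cell₁ … 'O'
lemma pvLoopA (k : Nat) (rn : List (Option String)) (h : k ≤ rn.length) (r : List Char) :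
    (PySem.List.pyRange 0 (2 * (k : Int) + 1) 1).foldl pvStepA (some (r, rn)) =
    some (r ++ ['O'] ++ (((rn.take k).map pvCellB).map (· ++ ['O'])).flatten, rn.drop k) := by
  induction k generalizing r with
  | zero =>
    rw [show (2 * ((0 : Nat) : Int) + 1) = 0 + 1 by norm_num, PySem.List.pyRange_one_singleton]
    simp [pvStepA]
  | succ k ih =>
    have hk : k ≤ rn.length := Nat.le_of_succ_le h
    have hklt : k < rn.length := by omega
    have hsplit : PySem.List.pyRange 0 (2 * ((k + 1 : Nat) : Int) + 1) 1 =
        (PySem.List.pyRange 0 (2 * (k : Int) + 1) 1 ++ [2 * (k : Int) + 1]) ++ [2 * (k : Int) + 2] := by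
      rw [show (2 * ((k + 1 : Nat) : Int) + 1) = (2 * (k : Int) + 2) + 1 by push_cast; ring,
          PySem.List.pyRange_one_succ_right (by omega),
          show (2 * (k : Int) + 2) = (2 * (k : Int) + 1) + 1 by ring,
          PySem.List.pyRange_one_succ_right (by omega)]
    have hdrop : rn.drop k = rn[k] :: rn.drop (k + 1) :=
      List.drop_eq_getElem_cons (by omega)
    have htake : rn.take (k + 1) = rn.take k ++ [rn[k]] := by
      rw [List.take_add_one]; simp [List.getElem?_eq_getElem hklt]
    have hodd : ¬ PySem.Int.mod (2 * (k : Int) + 1) 2 = 0 := by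
      rw [PySem.Int.mod_eq_emod_of_pos (by norm_num)]; omega
    have heven : PySem.Int.mod (2 * (k : Int) + 2) 2 = 0 := by
      rw [PySem.Int.mod_eq_emod_of_pos (by norm_num)]; omega
    rw [hsplit, List.foldl_append, List.foldl_append, ih hk]
    simp only [List.foldl_cons, List.foldl_nil, pvStepA, hodd, heven, if_pos, hdrop, htake]
    cases hx : rn[k] with
    | none => simp [pvCellB]
    | some s => simp [pvCellB]

-- the pieces list after B's loop has overwritten the first k odd slots (cell j read as rn.getD j)
def pvSets (rn : List (Option String)) : Nat → List (List Char) → List (List Char)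
  | 0, P => P
  | k+1, P => PySem.List.pySetD (pvSets rn k P) (2 * (k : Int) + 1) (pvCellB (rn.getD k none))

lemma pvSets_length (rn : List (Option String)) (k : Nat) (P : List (List Char)) :
    (pvSets rn k P).length = P.length := by
  induction k with
  | zero => rfl
  | succ k ih => simp [pvSets, PySem.List.length_pySetD, ih]

lemma pvSets_append (rn : List (Option String)) (k : Nat) (P Q : List (List Char))
    (h : 2 * k ≤ P.length) : pvSets rn k (P ++ Q) = pvSets rn k P ++ Q := by
  induction k with
  | zero => rfl
  | succ k ih =>
    have hk : 2 * k ≤ P.length := by omega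
    have hlen : 2 * k + 1 < P.length := by omega
    rw [pvSets, ih hk, pvSets,
        show (2 * ((k : Int)) + 1) = ((2 * k + 1 : Nat) : Int) by push_cast; ring,
        PySem.List.pySetD_natCast, PySem.List.pySetD_natCast,
        List.set_append_left _ _ (by rw [pvSets_length]; omega)]

-- B's loop over range(1, 2k+1, 2) with at least k nodes succeeds and performs exactly those k sets
lemma pvLoopB (rn : List (Option String)) (k : Nat) (h : k ≤ rn.length) (P : List (List Char)) :
    (PySem.List.pyRange 1 (2 * (k : Int) + 1) 2).foldl (pvStepB rn) (some P) =
    some (pvSets rn k P) := by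
  induction k generalizing P with
  | zero =>
    rw [show (2 * ((0 : Nat) : Int) + 1) = 1 by norm_num]
    rw [PySem.List.pyRange_of_pos _ _ (by norm_num : (0:Int) < 2)]
    simp [pvSets]
  | succ k ih =>
    have hk : k ≤ rn.length := Nat.le_of_succ_le h
    have hklt : k < rn.length := by omega
    have hsplit : PySem.List.pyRange 1 (2 * ((k + 1 : Nat) : Int) + 1) 2 =
        PySem.List.pyRange 1 (2 * (k : Int) + 1) 2 ++ [2 * (k : Int) + 1] := by
      rw [PySem.List.pyRange_of_pos _ _ (by norm_num : (0:Int) < 2),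
          PySem.List.pyRange_of_pos _ _ (by norm_num : (0:Int) < 2)]
      have h1 : ((1:Int) < 2 * ((k + 1 : Nat) : Int) + 1) := by push_cast; omega
      rw [if_pos h1]
      have he : ((2 * ((k + 1 : Nat) : Int) + 1 - 1 + 2 - 1) / 2).toNat = k + 1 := by
        push_cast; omega
      rw [he, List.range_succ, List.map_append]
      by_cases hk0 : (1:Int) < 2 * (k : Int) + 1
      · rw [if_pos hk0]
        have he2 : ((2 * (k : Int) + 1 - 1 + 2 - 1) / 2).toNat = k := by omega
        rw [he2]; simp; omega
      · have hk00 : k = 0 := by omega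
        subst hk00; simp
    rw [hsplit, List.foldl_append, ih hk]
    have hdivk : PySem.Int.floordiv (2 * (k : Int) + 1) 2 = (k : Int) := by
      rw [PySem.Int.floordiv_eq_ediv_of_pos (by norm_num)]; omega
    have hget : PySem.List.pyGet? rn ((k : Int)) = some rn[k] := by
      rw [PySem.List.pyGet?_natCast]; exact List.getElem?_eq_getElem hklt
    simp only [List.foldl_cons, List.foldl_nil, pvStepB, hdivk, hget]
    rw [pvSets, List.getD_eq_getElem rn none hklt]

-- performing the k sets on the all-dots row of length 2k+1 yields dot, cell₀, dot, cell₁, …, dot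
lemma pvSetsP (rn : List (Option String)) (k : Nat) (h : k ≤ rn.length) :
    pvSets rn k (List.replicate (2 * k + 1) ['O']) =
    ['O'] :: ((rn.take k).map (fun v => [pvCellB v, (['O'] : List Char)])).flatten := by
  induction k with
  | zero => simp [pvSets]
  | succ k ih =>
    have hk : k ≤ rn.length := Nat.le_of_succ_le h
    have hklt : k < rn.length := by omega
    have hrep : List.replicate (2 * (k + 1) + 1) (['O'] : List Char) =
        List.replicate (2 * k + 1) ['O'] ++ [['O'], ['O']] := by
      rw [show 2 * (k + 1) + 1 = (2 * k + 1) + 2 by ring, List.replicate_add]; rfl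
    have htake : rn.take (k + 1) = rn.take k ++ [rn[k]] := by
      rw [List.take_add_one]; simp [List.getElem?_eq_getElem hklt]
    have hlen : (['O'] :: ((rn.take k).map (fun v => [pvCellB v, (['O'] : List Char)])).flatten).length
        = 2 * k + 1 := by
      have hflatlen : ∀ (l : List (Option String)),
          ((l.map (fun v => [pvCellB v, (['O'] : List Char)])).flatten).length = 2 * l.length := by
        intro l
        induction l with
        | nil => rfl
        | cons a t iht => simp [iht]; omega
      rw [List.length_cons, hflatlen, List.length_take]
      omega
    rw [pvSets, hrep, pvSets_append rn k _ _ (by simp only [List.length_replicate]; omega), ih hk,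
        show (2 * ((k : Int)) + 1) = ((2 * k + 1 : Nat) : Int) by push_cast; ring,
        PySem.List.pySetD_natCast,
        List.set_append_right _ _ (by omega),
        htake, List.getD_eq_getElem rn none hklt, hlen]
    simp only [Nat.sub_self, List.set_cons_zero, List.map_append, List.flatten_append,
      List.map_cons, List.map_nil, List.flatten_cons, List.flatten_nil, List.append_nil,
      List.cons_append]

-- flattening the piece pairs equals A's cell++dot flattening
lemma pvFlatPairs (l : List (Option String)) :
    ((l.map (fun v => [pvCellB v, (['O'] : List Char)])).flatten).flatten =
    ((l.map pvCellB).map (· ++ ['O'])).flatten := by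
  induction l with
  | nil => rfl
  | cons a t ih => simp [ih]

-- ===== VERDICT (by name: the statement is the Claim_ definition above) =====
theorem get_even_row_spec : Claim_equal_get_even_row := by
  intro node row cols _ hpre
  unfold Pre_get_even_row at hpre
  unfold Spec_get_even_row get_even_row get_even_row_alt
  by_cases hc : cols < 1
  · rw [PySem.List.pyRange_one_eq_nil (by omega : (2 * cols - 1 : Int) ≤ 0)]
    have h0 : (2 * cols - 1).toNat = 0 := by omega
    rw [h0]
    simp only [List.replicate_zero, List.length_nil, Nat.cast_zero, List.foldl_nil]
    rw [PySem.List.pyRange_of_pos _ _ (by norm_num : (0:Int) < 2)]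
    simp
  · obtain ⟨k, hk⟩ : ∃ k : Nat, (k : Int) = cols - 1 := ⟨(cols - 1).toNat, by omega⟩
    rw [show (2 * cols - 1 : Int) = 2 * (k : Int) + 1 by omega,
        show (2 * (cols - 1) : Int) = 2 * (k : Int) by omega] at hpre ⊢
    rw [show (cols - 1 : Int) = (k : Int) from hk.symm] at hpre
    rw [show (2 * (k : Int) + 1).toNat = 2 * k + 1 by omega]
    generalize PySem.List.slice node
      (some (PySem.Int.truncdiv (row * (2 * (k : Int) + 1)) 2))
      (some (PySem.Int.truncdiv (row * (2 * (k : Int) + 1) + 2 * (k : Int)) 2)) = rn at hpre ⊢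
    have hlen : k ≤ rn.length := by
      rcases Nat.eq_zero_or_pos k with h0 | hpos
      · omega
      · have := hpre (by omega)
        omega
    have hlrep : ((List.replicate (2 * k + 1) (['O'] : List Char)).length : Int) = 2 * (k : Int) + 1 := by
      simp
    rw [pvLoopA k rn hlen [], hlrep, pvLoopB rn k hlen _, pvSetsP rn k hlen]
    simp only [pvJoinNil, List.flatten_cons, List.nil_append]
    rw [pvFlatPairs]
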